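-- pv_equiv track=rewrite | github.com/harishartanto/information-retrieval | DatabaseSystem.py | get_tf
-- ===== SOURCE A (Python) =====
-- def get_tf(clean_list_querycontent, list_word_content):
--     '''
--     Method untuk mendapatkan frekuensi kemunculan kata dalam query dan dokumen.
--     '''
--
--     # Mendapatkan panjang list querycontent
--     length_list_querycontent = len(clean_list_querycontent)
--
--     tf = []
--     # tf =[{'kata1' : 0,
--     #       'kata2' : 0},
--     #      {'kata1' : 0
--     #       'kata2' : 0}]
--
--     # Membuat template tf dengan value awal = 0
--     # Untuk setiap x dari panjang list querycontent
--     for x in range(length_list_querycontent):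
--         # tf merupakan list of dictionary dengan key yang berupa kata dalam list_word_content
--         tf.append(dict(zip(list_word_content, [0 for x in range(len(list_word_content))])))
--
--     # tf =[{'kata1' : 1,
--     #       'kata2' : 0},
--     #      {'kata1' : 0
--     #       'kata2' : 1}]
--
--     # Perulangan untuk mengisi value tf dengan frekuensi kata yang muncul dalam query dan dokumen
--     # Untuk setiap indeks dan kalimat dalam list clean_list_querycontent
--     for index, sentence in enumerate(clean_list_querycontent):
--         # Untuk setiap kata di dalam kalimat, akan dipisah menjadi list ['', '']
--         for word in sentence.split(" "):
--             # Jika kata ada dalam template tf,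
--             # maka value pada template tf dari kata tersebut akan ditambah 1
--             if word in tf[index]:
--                 tf[index][word] += 1
--
--     return tf
-- ===== SOURCE B (Python) =====
-- def get_tf(clean_list_querycontent, list_word_content):
--     # For each sentence, count each vocabulary word directly in its token list:
--     # no counting table is built and no per-token increment loop runs.
--     return [
--         {w: sentence.split(" ").count(w) for w in list_word_content}
--         for sentence in clean_list_querycontent
--     ]
-- ===== Notes on version B (the rewrite author's own statement) =====
-- stated objective: alternative
-- what changed: B drops A's zero-initialized dict templates and per-token increment loop entirely: for each sentence it scans the token list once per vocabulary word with list.count, building each output dict by a single comprehension over the vocabulary.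
import Mathlib
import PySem

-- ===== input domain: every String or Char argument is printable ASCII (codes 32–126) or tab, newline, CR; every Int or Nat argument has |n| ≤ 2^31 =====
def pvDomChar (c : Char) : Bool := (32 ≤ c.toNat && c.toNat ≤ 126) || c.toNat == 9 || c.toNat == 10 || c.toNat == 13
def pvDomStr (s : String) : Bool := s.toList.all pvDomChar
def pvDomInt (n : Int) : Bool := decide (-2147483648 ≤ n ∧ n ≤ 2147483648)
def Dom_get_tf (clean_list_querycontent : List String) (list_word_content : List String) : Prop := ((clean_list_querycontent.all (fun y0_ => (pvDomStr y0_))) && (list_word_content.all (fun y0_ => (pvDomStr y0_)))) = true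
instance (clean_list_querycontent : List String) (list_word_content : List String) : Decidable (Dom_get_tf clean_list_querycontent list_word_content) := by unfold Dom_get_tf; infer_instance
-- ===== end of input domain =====

-- B replaces A's zero-initialized templates and per-token increment loop by a direct
-- per-vocabulary-word scan of each sentence's token list (list.count); no counting
-- table is maintained at all (objective: alternative).

-- ===== PORT A =====
def get_tf (clean_list_querycontent : List String) (list_word_content : List String) : List (List (String × Int)) :=
  let length_list_querycontent := clean_list_querycontent.length
  -- template-building loop: tf.append(dict(zip(list_word_content, [0]*len)))
  let tf0 : List (PySem.Dict String Int) :=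
    (PySem.List.pyRange 0 (length_list_querycontent : Int) 1).foldl
      (fun tf _ => tf ++ [PySem.Dict.ofList (list_word_content.zip
          ((PySem.List.pyRange 0 (list_word_content.length : Int) 1).map (fun _ => (0 : Int))))]) []
  -- counting loop: for index, sentence in enumerate(...): for word in sentence.split(" "): ...
  let tf :=
    (PySem.List.enumerate clean_list_querycontent 0).foldl
      (fun tf p =>
        ((PySem.Str.split? p.2 " ").getD []).foldl
          (fun tf word =>
            if (PySem.List.pyGetD tf p.1 PySem.Dict.empty).contains word then
              tf.set p.1.toNat ((PySem.List.pyGetD tf p.1 PySem.Dict.empty).modify word 0 (· + 1))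
            else tf) tf) tf0
  tf.map (fun d => d.items)

-- ===== PORT B =====
def get_tf_alt (clean_list_querycontent : List String) (list_word_content : List String) : List (List (String × Int)) :=
  clean_list_querycontent.map (fun sentence =>
    -- {w: sentence.split(" ").count(w) for w in list_word_content}
    (list_word_content.foldl
        (fun d w => d.insert w ((PySem.List.count ((PySem.Str.split? sentence " ").getD []) w : Int)))
        PySem.Dict.empty).items)

-- ===== PRECONDITION & SPEC =====
def Spec_get_tf (clean_list_querycontent : List String) (list_word_content : List String) (out : List (List (String × Int))) : Prop := out = get_tf_alt clean_list_querycontent list_word_content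
instance (clean_list_querycontent : List String) (list_word_content : List String) (out : List (List (String × Int))) : Decidable (Spec_get_tf clean_list_querycontent list_word_content out) := by unfold Spec_get_tf; infer_instance

-- ===== CLAIM (what is proved, stated in full; the proofs are below) =====
def Claim_equal_get_tf : Prop := ∀ (clean_list_querycontent : List String) (list_word_content : List String), Dom_get_tf clean_list_querycontent list_word_content → Spec_get_tf clean_list_querycontent list_word_content (get_tf clean_list_querycontent list_word_content)

-- ===== LEMMAS AND PROOFS =====

-- A's zero template for a vocabulary
def pvTemplate (voc : List String) : PySem.Dict String Int :=
  PySem.Dict.ofList (voc.zip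
    ((PySem.List.pyRange 0 (voc.length : Int) 1).map (fun _ => (0 : Int))))

-- A's per-sentence counting loop, on one dict
def pvUpd (d : PySem.Dict String Int) (ws : List String) : PySem.Dict String Int :=
  ws.foldl (fun d w => if d.contains w then d.modify w 0 (· + 1) else d) d

-- L1: the template loop builds q.length copies of the template
lemma pvL1 (q voc : List String) :
    (PySem.List.pyRange 0 (q.length : Int) 1).foldl
      (fun tf _ => tf ++ [pvTemplate voc]) []
    = List.replicate q.length (pvTemplate voc) := by
  have gen : ∀ (l : List Int) (acc : List (PySem.Dict String Int)),
      l.foldl (fun tf _ => tf ++ [pvTemplate voc]) acc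
      = acc ++ List.replicate l.length (pvTemplate voc) := by
    intro l
    induction l with
    | nil => intro acc; simp
    | cons x t ih => intro acc; simp [ih, List.replicate_succ]
  rw [gen]
  simp [PySem.List.pyRange_zero_natCast]

-- L2: the inner word loop at index pre.length only rewrites that slot
lemma pvL2 (ws : List String) (pre : List (PySem.Dict String Int)) (d : PySem.Dict String Int)
    (rest : List (PySem.Dict String Int)) :
    ws.foldl (fun tf word =>
        if (PySem.List.pyGetD tf (pre.length : Int) PySem.Dict.empty).contains word then
          tf.set (pre.length : Int).toNat
            ((PySem.List.pyGetD tf (pre.length : Int) PySem.Dict.empty).modify word 0 (· + 1))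
        else tf) (pre ++ d :: rest)
    = pre ++ pvUpd d ws :: rest := by
  induction ws generalizing d with
  | nil => simp [pvUpd]
  | cons w ws ih =>
    simp only [List.foldl_cons, pvUpd, PySem.List.pyGetD_natCast, Int.toNat_natCast]
    have hget : (pre ++ d :: rest).getD pre.length PySem.Dict.empty = d := by simp
    have hset : ∀ v, (pre ++ d :: rest).set pre.length v = pre ++ v :: rest := by
      intro v; simp
    rw [hget]
    by_cases hc : d.contains w = true
    · simp only [hc, if_true, hset]
      simpa [pvUpd] using ih (d.modify w 0 (· + 1))
    · simp only [Bool.not_eq_true] at hc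
      simp only [hc, Bool.false_eq_true, if_false]
      simpa [pvUpd] using ih d

-- L3: the outer enumerate loop maps pvUpd over the sentences
lemma pvL3 (q : List String) (voc : List String) (pre : List (PySem.Dict String Int)) :
    (PySem.List.enumerate q (pre.length : Int)).foldl
      (fun tf p =>
        ((PySem.Str.split? p.2 " ").getD []).foldl
          (fun tf word =>
            if (PySem.List.pyGetD tf p.1 PySem.Dict.empty).contains word then
              tf.set p.1.toNat ((PySem.List.pyGetD tf p.1 PySem.Dict.empty).modify word 0 (· + 1))
            else tf) tf) (pre ++ List.replicate q.length (pvTemplate voc))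
    = pre ++ q.map (fun s => pvUpd (pvTemplate voc) ((PySem.Str.split? s " ").getD [])) := by
  induction q generalizing pre with
  | nil => simp
  | cons s q ih =>
    rw [PySem.List.enumerate_cons, List.length_cons, List.replicate_succ, List.foldl_cons]
    rw [pvL2 ((PySem.Str.split? s " ").getD []) pre (pvTemplate voc)
        (List.replicate q.length (pvTemplate voc))]
    have h := ih (pre ++ [pvUpd (pvTemplate voc) ((PySem.Str.split? s " ").getD [])])
    simp only [List.length_append, List.length_cons, List.length_nil, Nat.cast_add,
      Nat.cast_one, zero_add, List.append_assoc, List.cons_append,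
      List.nil_append, List.map_cons] at h ⊢
    exact h

-- L4: value of pvUpd at a key
lemma pvL4 (ws : List String) (d : PySem.Dict String Int) (w : String) :
    (pvUpd d ws).getD w 0 = if d.contains w then d.getD w 0 + ws.count w else d.getD w 0 := by
  induction ws generalizing d with
  | nil => simp [pvUpd]
  | cons w' ws ih =>
    simp only [pvUpd, List.foldl_cons]
    by_cases hc : d.contains w' = true
    · simp only [hc, if_true]
      rw [show (List.foldl (fun d w => if d.contains w = true then d.modify w 0 (· + 1) else d)
          (d.modify w' 0 (· + 1)) ws) = pvUpd (d.modify w' 0 (· + 1)) ws from rfl, ih]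
      rw [PySem.Dict.contains_modify, PySem.Dict.getD_modify]
      by_cases hww : w = w'
      · subst hww
        simp only [BEq.rfl, Bool.true_or, hc, if_true, List.count_cons]
        push_cast
        omega
      · have hbe : (w == w') = false := by simp [hww]
        have hbe' : (w' == w) = false := by simp [Ne.symm hww]
        simp only [hbe, Bool.false_or, if_neg hww, List.count_cons, hbe',
          Bool.false_eq_true, if_false, add_zero]
    · simp only [Bool.not_eq_true] at hc
      simp only [hc, Bool.false_eq_true, if_false]
      rw [show (List.foldl (fun d w => if d.contains w = true then d.modify w 0 (· + 1) else d)
          d ws) = pvUpd d ws from rfl, ih]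
      by_cases hww : w = w'
      · subst hww; simp [hc]
      · have hbe : (w' == w) = false := by simp [Ne.symm hww]
        simp [List.count_cons, hbe]

-- L5: pvUpd does not change the key list
lemma pvL5 (ws : List String) (d : PySem.Dict String Int) : (pvUpd d ws).keys = d.keys := by
  induction ws generalizing d with
  | nil => rfl
  | cons w ws ih =>
    simp only [pvUpd, List.foldl_cons]
    by_cases hc : d.contains w = true
    · simp only [hc, if_true]
      rw [show (List.foldl (fun d w => if d.contains w = true then d.modify w 0 (· + 1) else d)
          (d.modify w 0 (· + 1)) ws) = pvUpd (d.modify w 0 (· + 1)) ws from rfl, ih]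
      rw [PySem.Dict.keys_modify, PySem.Dict.keys_insert_of_contains _ _ hc]
    · simp only [Bool.not_eq_true] at hc
      simp only [hc, Bool.false_eq_true, if_false]
      exact ih d

-- L6: the template's keys and values
lemma pvL6_keys (voc : List String) : (pvTemplate voc).keys = PySem.Set.ofList voc := by
  have hlen : ((PySem.List.pyRange 0 (voc.length : Int) 1).map (fun _ => (0 : Int))).length
      = voc.length := by simp [PySem.List.pyRange_zero_natCast]
  unfold pvTemplate PySem.Dict.ofList PySem.Dict.update
  rw [PySem.Dict.keys_foldl_insert_key _ Prod.fst (fun _ p => p.2)]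
  rw [PySem.Dict.keys_empty, PySem.Set.update_nil_left]
  rw [List.map_fst_zip (le_of_eq hlen.symm)]

lemma pvL6_getD (voc : List String) (w : String) : (pvTemplate voc).getD w 0 = 0 := by
  have gen : ∀ (ps : List (String × Int)) (d : PySem.Dict String Int),
      (∀ p ∈ ps, p.2 = 0) → d.getD w 0 = 0 →
      (ps.foldl (fun acc p => acc.insert p.1 p.2) d).getD w 0 = 0 := by
    intro ps
    induction ps with
    | nil => intro d _ hd; simpa using hd
    | cons p ps ih =>
      intro d hz hd
      simp only [List.foldl_cons]
      refine ih _ (fun q hq => hz q (List.mem_cons_of_mem _ hq)) ?_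
      rw [PySem.Dict.getD_insert]
      split_ifs with h
      · exact hz p (List.mem_cons_self)
      · exact hd
  unfold pvTemplate PySem.Dict.ofList PySem.Dict.update
  refine gen _ _ ?_ (PySem.Dict.getD_empty _ _)
  intro p hp
  have := List.of_mem_zip hp
  simpa using (List.eq_of_mem_map_const this.2 : p.2 = 0)

-- L7: value of B's comprehension dict at a key (generic inserted value f w)
lemma pvL7 (voc : List String) (f : String → Int) (d : PySem.Dict String Int) (w : String) :
    (voc.foldl (fun d w => d.insert w (f w)) d).getD w 0
    = if w ∈ voc then f w else d.getD w 0 := by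
  induction voc generalizing d with
  | nil => simp
  | cons v voc ih =>
    simp only [List.foldl_cons, ih, List.mem_cons]
    by_cases hm : w ∈ voc
    · simp [hm]
    · simp only [hm, if_false, or_false]
      rw [PySem.Dict.getD_insert]
      by_cases hwv : w = v <;> simp [hwv]

-- per-sentence equality: A's incremented template equals B's count-comprehension dict
lemma pvSentence (voc : List String) (ws : List String) :
    (pvUpd (pvTemplate voc) ws).items
    = (voc.foldl (fun d w => d.insert w ((PySem.List.count ws w : Int))) PySem.Dict.empty).items := by
  have hkA : (pvUpd (pvTemplate voc) ws).keys = PySem.Set.ofList voc := by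
    rw [pvL5, pvL6_keys]
  have hkB : (voc.foldl (fun d w => d.insert w ((PySem.List.count ws w : Int))) PySem.Dict.empty).keys
      = PySem.Set.ofList voc := by
    rw [PySem.Dict.keys_foldl_insert _ (fun _ w => ((PySem.List.count ws w : Int))),
      PySem.Dict.keys_empty, PySem.Set.update_nil_left]
  have hnA : (pvUpd (pvTemplate voc) ws).keys.Nodup := by
    rw [hkA]; exact PySem.Set.nodup_ofList voc
  have hnB : (voc.foldl (fun d w => d.insert w ((PySem.List.count ws w : Int))) PySem.Dict.empty).keys.Nodup := by
    rw [hkB]; exact PySem.Set.nodup_ofList voc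
  rw [PySem.Dict.items_eq_map_keys _ hnA 0, PySem.Dict.items_eq_map_keys _ hnB 0, hkA, hkB]
  refine List.map_congr_left (fun k hk => ?_)
  have hkv : k ∈ voc := (PySem.Set.mem_ofList voc k).mp hk
  have hcT : (pvTemplate voc).contains k = true := by
    rw [PySem.Dict.contains_iff_mem_keys, pvL6_keys]
    exact (PySem.Set.mem_ofList voc k).mpr hkv
  have hA : (pvUpd (pvTemplate voc) ws).getD k 0 = (ws.count k : Int) := by
    rw [pvL4, if_pos hcT, pvL6_getD, zero_add]
  have hB : (voc.foldl (fun d w => d.insert w ((PySem.List.count ws w : Int))) PySem.Dict.empty).getD k 0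
      = (ws.count k : Int) := by
    rw [pvL7, if_pos hkv]
    simp [PySem.List.count_eq]
  rw [hA, hB]

-- ===== VERDICT (by name: the statement is the Claim_ definition above) =====
theorem get_tf_spec : Claim_equal_get_tf := by
  intro q voc _
  unfold Spec_get_tf get_tf get_tf_alt
  simp only []
  rw [show (PySem.List.pyRange 0 (q.length : Int) 1).foldl
      (fun tf _ => tf ++ [PySem.Dict.ofList (voc.zip
          ((PySem.List.pyRange 0 (voc.length : Int) 1).map (fun _ => (0 : Int))))]) []
    = List.replicate q.length (pvTemplate voc) from pvL1 q voc]
  have h3 := pvL3 q voc []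
  simp only [List.length_nil, Nat.cast_zero, List.nil_append] at h3
  rw [h3, List.map_map]
  exact List.map_congr_left (fun s _ => pvSentence voc _)
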